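-- pv_equiv track=rewrite | github.com/ceafagerlund/GruDatRepo | Ovn6_scarves_cache.py | CacheScarf
-- ===== SOURCE A (Python) =====
-- def CacheScarf(n,h,cache):
--     """Finds maximum profit from making scarves from n meters
--     of yarn, n being a natural number. Do not use other input.
--     Time complexity: O(n^2)."""
--     cache = [None]*n        #works, as no reset is made after last call
--     prev = 0
--     if n == 0:              # base case
--         return 0
--     else:
--         for i in range (1,n+1):
--             new = 0
--             if not cache[n-i]:  # checks if already computed
--                 cache[n-i] = CacheScarf(n-i,h,cache)
--             new += cache[n-i]   #adds recursion call value
--             if i <= 4: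
--                     new += h[i] #adds h-value
--             if prev < new:
--                 prev = new
--     maximum = prev              # finds maximum
--     return maximum
-- ===== SOURCE B (Python) =====
-- def CacheScarf(n, h, cache):
--     """Bottom-up dynamic programme: dp[m] is the best profit from m meters.
--     Only scarves of lengths 1..4 have a profit (h[1..4]); leftover yarn is
--     worthless, so dp[m] = max(0, max_{1<=i<=min(m,4)} dp[m-i] + h[i])."""
--     if n <= 0:
--         return 0
--     dp = [0]
--     for m in range(1, n + 1):
--         best = 0
--         for i in range(1, min(m, 4) + 1):
--             v = dp[m - i] + h[i]
--             if v > best: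
--                 best = v
--         dp.append(best)
--     return dp[n]
-- ===== Notes on version B (the rewrite author's own statement) =====
-- stated objective: faster
-- what changed: Replaced the exponential recursion (whose per-call cache is reset to [None]*n and so never memoises) by a bottom-up DP filling dp[0..n] once, dropping the provably redundant cut lengths i>4; intended as faster: in a timing run A timed out on most inputs from n=64 up while B returned instantly, but that run could not certify a ratio from the few inputs A finished.
import Mathlib
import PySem

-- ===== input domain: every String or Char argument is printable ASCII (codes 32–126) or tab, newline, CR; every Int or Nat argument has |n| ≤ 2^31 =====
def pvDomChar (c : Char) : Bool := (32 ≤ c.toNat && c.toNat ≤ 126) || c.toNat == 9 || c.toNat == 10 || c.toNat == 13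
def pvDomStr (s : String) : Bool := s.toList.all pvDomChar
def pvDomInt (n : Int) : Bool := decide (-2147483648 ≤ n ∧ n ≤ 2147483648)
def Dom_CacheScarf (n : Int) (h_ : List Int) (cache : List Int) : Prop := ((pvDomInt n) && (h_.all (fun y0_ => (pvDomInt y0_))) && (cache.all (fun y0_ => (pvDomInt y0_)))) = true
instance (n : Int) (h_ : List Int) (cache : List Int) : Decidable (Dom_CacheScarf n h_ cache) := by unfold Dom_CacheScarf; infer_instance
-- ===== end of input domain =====

-- B replaces A's exponential recursion (its cache is reset to [None]*n on every call, so it never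
-- memoises anything) by a bottom-up DP over lengths 1..4 only. Intended as faster; in a timing run
-- A timed out on most inputs from n=64 up while B returned, but no ratio could be certified from the
-- few inputs A finished.

-- ===== PORT A =====
-- truthiness of a cache cell: Python's `not cache[n-i]` is true for None and for 0
def pyFalsyOpt (o : Option Int) : Bool :=
  match o with
  | none => true
  | some v => v == 0

-- the `for i in range(1, n+1)` loop of A; `k` counts the remaining iterations (totality guard),
-- `recf` is the recursive call CacheScarf(·, h, cache)
def loopA (recf : Nat → Int) (h_ : List Int) (n : Nat) : Nat → Nat → List (Option Int) → Int → Int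
  | _, 0, _, prev => prev
  | i, k+1, cache, prev =>
    let idx := n - i
    let cache' := if pyFalsyOpt (cache.getD idx none) then cache.set idx (some (recf idx)) else cache
    let new : Int := ((cache'.getD idx none).getD 0) +
      (if i ≤ 4 then (PySem.List.pyGet? h_ (Int.ofNat i)).getD 0 else 0)
    loopA recf h_ n (i+1) k cache' (if prev < new then new else prev)

-- A itself; `fuel` is a totality guard (the recursion is on strictly smaller n, so fuel = n+1 suffices)
def goA : Nat → Nat → List Int → Int
  | 0, _, _ => 0
  | fuel+1, n, h_ =>
    if n = 0 then 0
    else loopA (fun m => goA fuel m h_) h_ n 1 n (List.replicate n none) 0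

def CacheScarf (n : Int) (h_ : List Int) (cache : List Int) : Int :=
  goA (n.toNat + 1) n.toNat h_

-- ===== PORT B =====
-- inner loop `for i in range(1, min(m,4)+1)` of Source B; k = remaining iterations
def innerB (h_ dp : List Int) (m : Nat) : Nat → Nat → Int → Int
  | _, 0, best => best
  | i, k+1, best =>
    let v : Int := dp.getD (m - i) 0 + (PySem.List.pyGet? h_ (Int.ofNat i)).getD 0
    innerB h_ dp m (i+1) k (if v > best then v else best)

-- outer loop `for m in range(1, n+1)` of Source B, appending dp[m]
def outerB (h_ : List Int) : Nat → Nat → List Int → List Int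
  | _, 0, dp => dp
  | m, k+1, dp => outerB h_ (m+1) k (dp ++ [innerB h_ dp m 1 (min m 4) 0])

def CacheScarf_alt (n : Int) (h_ : List Int) (cache : List Int) : Int :=
  if n ≤ 0 then 0
  else (outerB h_ 1 n.toNat [0]).getD n.toNat 0

-- ===== PRECONDITION & SPEC =====
-- Pre_ excludes exactly the inputs on which A raises IndexError: n ≥ 1 while h_ is too short
-- for the accesses h_[1..min(n,4)].
def Pre_CacheScarf (n : Int) (h_ : List Int) (cache : List Int) : Prop :=
  n ≤ 0 ∨ min n 4 < (h_.length : Int)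
instance (n : Int) (h_ : List Int) (cache : List Int) : Decidable (Pre_CacheScarf n h_ cache) := by
  unfold Pre_CacheScarf; infer_instance

def pvWitness_CacheScarf : Int × List Int × List Int := (5, [0, 1, 3, 4, 6], [])

def Spec_CacheScarf (n : Int) (h_ : List Int) (cache : List Int) (out : Int) : Prop := out = CacheScarf_alt n h_ cache
instance (n : Int) (h_ : List Int) (cache : List Int) (out : Int) : Decidable (Spec_CacheScarf n h_ cache out) := by unfold Spec_CacheScarf; infer_instance

-- ===== CLAIM (what is proved, stated in full; the proofs are below) =====
def Claim_equal_CacheScarf : Prop := ∀ (n : Int) (h_ : List Int) (cache : List Int), Dom_CacheScarf n h_ cache → Pre_CacheScarf n h_ cache → Spec_CacheScarf n h_ cache (CacheScarf n h_ cache)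

-- ===== LEMMAS AND PROOFS =====

-- `if a < b then b else a`, the shape both Pythons use to take a maximum
def pvMax (a b : Int) : Int := if a < b then b else a

-- max-fold over a list of indices
def pvF (f : Nat → Int) (l : List Nat) (b : Int) : Int := l.foldl (fun p x => pvMax p (f x)) b

-- the profit h[i] (0 out of range; in-range under Pre_)
def pvH (h_ : List Int) (x : Nat) : Int := (PySem.List.pyGet? h_ (Int.ofNat x)).getD 0

-- the DP value: best profit from m meters
def pvG (h_ : List Int) (m : Nat) : Int := (outerB h_ 1 m [0]).getD m 0

theorem pvF_le_init (f : Nat → Int) (l : List Nat) (b : Int) : b ≤ pvF f l b := by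
  induction l generalizing b with
  | nil => simp [pvF]
  | cons x t ih =>
    refine le_trans ?_ (ih (pvMax b (f x)))
    unfold pvMax; split <;> omega

theorem pvF_mem_le (f : Nat → Int) (l : List Nat) (b : Int) (x : Nat) (hx : x ∈ l) :
    f x ≤ pvF f l b := by
  induction l generalizing b with
  | nil => cases hx
  | cons y t ih =>
    rcases List.mem_cons.mp hx with h | h
    · subst h
      refine le_trans ?_ (pvF_le_init f t (pvMax b (f x)))
      unfold pvMax; split <;> omega
    · exact ih _ h

theorem pvF_le (f : Nat → Int) (l : List Nat) (b c : Int) (hb : b ≤ c)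
    (hl : ∀ x ∈ l, f x ≤ c) : pvF f l b ≤ c := by
  induction l generalizing b with
  | nil => simpa [pvF] using hb
  | cons y t ih =>
    show pvF f t (pvMax b (f y)) ≤ c
    refine ih _ ?_ (fun x hx => hl x (List.mem_cons_of_mem _ hx))
    have := hl y (List.mem_cons_self)
    unfold pvMax; split <;> omega

theorem pvF_const (f : Nat → Int) (l : List Nat) (b : Int) (hl : ∀ x ∈ l, f x ≤ b) :
    pvF f l b = b := by
  refine le_antisymm (pvF_le f l b b le_rfl hl) (pvF_le_init f l b)

theorem pvF_congr (f g : Nat → Int) (l : List Nat) (b : Int)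
    (h : ∀ x ∈ l, f x = g x) : pvF f l b = pvF g l b := by
  induction l generalizing b with
  | nil => rfl
  | cons y t ih =>
    show pvF f t (pvMax b (f y)) = pvF g t (pvMax b (g y))
    rw [h y List.mem_cons_self, ih _ (fun x hx => h x (List.mem_cons_of_mem _ hx))]

theorem pvF_append (f : Nat → Int) (l₁ l₂ : List Nat) (b : Int) :
    pvF f (l₁ ++ l₂) b = pvF f l₂ (pvF f l₁ b) := by
  simp [pvF, List.foldl_append]

-- outerB appends, so splits
theorem outerB_split (h_ : List Int) (k₁ k₂ m : Nat) (dp : List Int) :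
    outerB h_ m (k₁ + k₂) dp = outerB h_ (m + k₁) k₂ (outerB h_ m k₁ dp) := by
  induction k₁ generalizing m dp with
  | zero => simp [outerB]
  | succ k ih =>
    show outerB h_ m (k + 1 + k₂) dp = _
    have : k + 1 + k₂ = (k + k₂) + 1 := by omega
    rw [this]
    show outerB h_ (m+1) (k + k₂) _ = _
    rw [ih]
    have : m + (k + 1) = m + 1 + k := by omega
    rw [this]
    rfl

theorem outerB_length (h_ : List Int) (k m : Nat) (dp : List Int) :
    (outerB h_ m k dp).length = dp.length + k := by
  induction k generalizing m dp with
  | zero => rfl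
  | succ k ih =>
    show (outerB h_ (m+1) k (dp ++ _)).length = _
    rw [ih]; simp; omega

theorem outerB_getD_prefix (h_ : List Int) (k m : Nat) (dp : List Int) (j : Nat)
    (hj : j < dp.length) : (outerB h_ m k dp).getD j 0 = dp.getD j 0 := by
  induction k generalizing m dp with
  | zero => rfl
  | succ k ih =>
    show (outerB h_ (m+1) k (dp ++ _)).getD j 0 = _
    rw [ih _ _ (by simp; omega)]
    exact List.getD_append _ _ _ _ hj

theorem pvG_entries (h_ : List Int) (N j : Nat) (hj : j ≤ N) :
    (outerB h_ 1 N [0]).getD j 0 = pvG h_ j := by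
  have hsplit : outerB h_ 1 N [0] = outerB h_ (1 + j) (N - j) (outerB h_ 1 j [0]) := by
    have : N = j + (N - j) := by omega
    rw [← outerB_split]; rw [← this]
  have hlen : (outerB h_ 1 j [0]).length = j + 1 := by rw [outerB_length]; simp; omega
  rw [hsplit, outerB_getD_prefix h_ (N - j) (1 + j) (outerB h_ 1 j [0]) j (by rw [hlen]; omega)]
  rfl

theorem innerB_fold (h_ dp : List Int) (m : Nat) :
    ∀ (k i : Nat) (best : Int),
      innerB h_ dp m i k best =
        pvF (fun x => dp.getD (m - x) 0 + pvH h_ x) (List.range' i k) best := by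
  intro k
  induction k with
  | zero => intro i best; rfl
  | succ k ih =>
    intro i best
    rw [List.range'_succ]
    show innerB h_ dp m (i+1) k _ = pvF _ (List.range' (i+1) k) (pvMax best _)
    rw [ih]
    rfl

theorem pvG_zero (h_ : List Int) : pvG h_ 0 = 0 := rfl

theorem pvG_succ (h_ : List Int) (m : Nat) :
    pvG h_ (m + 1) =
      pvF (fun x => pvG h_ (m + 1 - x) + pvH h_ x) (List.range' 1 (min (m + 1) 4)) 0 := by
  have hsplit : outerB h_ 1 (m + 1) [0] = outerB h_ (1 + m) 1 (outerB h_ 1 m [0]) := by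
    rw [← outerB_split]
  have hT : (outerB h_ 1 m [0]).length = m + 1 := by rw [outerB_length]; simp; omega
  unfold pvG
  rw [hsplit]
  show (outerB h_ 1 m [0] ++ [innerB h_ (outerB h_ 1 m [0]) (1 + m) 1 (min (1 + m) 4) 0]).getD (m+1) 0 = _
  rw [List.getD_append_right _ _ _ _ (by rw [hT])]
  simp only [hT, Nat.sub_self, List.getD_cons_zero]
  rw [innerB_fold]
  have h1m : 1 + m = m + 1 := by omega
  rw [h1m]
  refine pvF_congr _ _ _ _ (fun x hx => ?_)
  have hx' := List.mem_range'_1.mp hx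
  rw [pvG_entries h_ m (m + 1 - x) (by omega)]
  rfl

theorem pvG_nonneg (h_ : List Int) (m : Nat) : 0 ≤ pvG h_ m := by
  cases m with
  | zero => simp [pvG_zero]
  | succ m => rw [pvG_succ]; exact pvF_le_init _ _ _

theorem pvG_mono_succ (h_ : List Int) : ∀ m, pvG h_ m ≤ pvG h_ (m + 1) := by
  intro m
  induction m using Nat.strong_induction_on with
  | _ m ih =>
    cases m with
    | zero => rw [pvG_zero]; exact pvG_nonneg h_ 1
    | succ m' =>
      rw [pvG_succ h_ m']
      refine pvF_le _ _ _ _ (pvG_nonneg h_ (m' + 2)) (fun x hx => ?_)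
      have hx' := List.mem_range'_1.mp hx
      have hstep : pvG h_ (m' + 1 - x) ≤ pvG h_ (m' + 2 - x) := by
        have h1 : m' + 1 - x < m' + 1 := by omega
        have h2 : m' + 2 - x = (m' + 1 - x) + 1 := by omega
        rw [h2]; exact ih _ h1
      have hmem : x ∈ List.range' 1 (min (m' + 2) 4) := by
        rw [List.mem_range'_1]; omega
      have := pvF_mem_le (fun x => pvG h_ (m' + 2 - x) + pvH h_ x)
        (List.range' 1 (min (m' + 2) 4)) 0 x hmem
      rw [← pvG_succ h_ (m' + 1)] at this
      simp only at this
      omega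

theorem pvG_mono (h_ : List Int) (a b : Nat) (hab : a ≤ b) : pvG h_ a ≤ pvG h_ b := by
  induction b with
  | zero => simp_all
  | succ b ih =>
    rcases Nat.lt_or_ge a (b + 1) with h | h
    · exact le_trans (ih (by omega)) (pvG_mono_succ h_ b)
    · have : a = b + 1 := by omega
      simp [this]

theorem loopA_fold (recf : Nat → Int) (h_ : List Int) (n : Nat) :
    ∀ (k i : Nat) (cache : List (Option Int)) (prev : Int),
      1 ≤ i → i + k = n + 1 → cache.length = n →
      (∀ j, j + i ≤ n → cache.getD j none = none) →
      loopA recf h_ n i k cache prev =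
        pvF (fun x => recf (n - x) + (if x ≤ 4 then pvH h_ x else 0)) (List.range' i k) prev := by
  intro k
  induction k with
  | zero => intro i cache prev _ _ _ _; rfl
  | succ k ih =>
    intro i cache prev hi hik hlen hinv
    have hidx : cache.getD (n - i) none = none := hinv (n - i) (by omega)
    have hfalsy : pyFalsyOpt (cache.getD (n - i) none) = true := by rw [hidx]; rfl
    have hlt : n - i < cache.length := by omega
    rw [List.range'_succ]
    show loopA recf h_ n i (k+1) cache prev = _
    unfold loopA
    simp only [hfalsy, if_pos]
    have hget : ((cache.set (n - i) (some (recf (n - i)))).getD (n - i) none) = some (recf (n - i)) := by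
      simp [List.getD, List.getElem?_set_self hlt]
    rw [hget]
    simp only [Option.getD_some]
    rw [ih (i+1) _ _ (by omega) (by omega) (by simpa using hlen)
      (fun j hj => by
        have hne : n - i ≠ j := by omega
        rw [List.getD, List.getElem?_set_ne hne, ← List.getD]
        exact hinv j (by omega))]
    rfl

theorem goA_eq_pvG (h_ : List Int) : ∀ (fuel n : Nat), n < fuel → goA fuel n h_ = pvG h_ n := by
  intro fuel
  induction fuel with
  | zero => intro n hn; omega
  | succ fuel ih =>
    intro n hn
    cases n with
    | zero => simp [goA, pvG_zero]
    | succ m =>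
      show goA (fuel+1) (m+1) h_ = _
      unfold goA
      rw [if_neg (by omega)]
      rw [loopA_fold _ h_ (m+1) (m+1) 1 _ 0 (by omega) (by omega) (by simp)
        (fun j hj => by simp only [List.getD, List.getElem?_replicate]; split <;> rfl)]
      have hcongr : pvF (fun x => goA fuel ((m+1) - x) h_ + (if x ≤ 4 then pvH h_ x else 0))
            (List.range' 1 (m+1)) 0 =
          pvF (fun x => pvG h_ ((m+1) - x) + (if x ≤ 4 then pvH h_ x else 0))
            (List.range' 1 (m+1)) 0 := by
        refine pvF_congr _ _ _ _ (fun x hx => ?_)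
        have hx' := List.mem_range'_1.mp hx
        rw [ih ((m+1) - x) (by omega)]
      rw [hcongr]
      -- split the range at min (m+1) 4
      have hsplit : List.range' 1 (m+1) =
          List.range' 1 (min (m+1) 4) ++ List.range' (1 + min (m+1) 4) ((m+1) - min (m+1) 4) := by
        rw [List.range'_append_1]
        congr 1
        omega
      rw [hsplit, pvF_append]
      have hfirst : pvF (fun x => pvG h_ ((m+1) - x) + (if x ≤ 4 then pvH h_ x else 0))
          (List.range' 1 (min (m+1) 4)) 0 = pvG h_ (m+1) := by
        rw [pvG_succ]
        refine pvF_congr _ _ _ _ (fun x hx => ?_)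
        have hx' := List.mem_range'_1.mp hx
        rw [if_pos (by omega)]
      rw [hfirst]
      refine pvF_const _ _ _ (fun x hx => ?_)
      have hx' := List.mem_range'_1.mp hx
      rw [if_neg (by omega)]
      simpa using pvG_mono h_ ((m+1) - x) (m+1) (by omega)

-- ===== VERDICT (by name: the statement is the Claim_ definition above) =====
theorem CacheScarf_spec : Claim_equal_CacheScarf := by
  intro n h_ cache _ _
  unfold Spec_CacheScarf CacheScarf CacheScarf_alt
  rcases le_or_gt n 0 with hn | hn
  · rw [if_pos hn]
    have : n.toNat = 0 := by omega
    rw [this]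
    rfl
  · rw [if_neg (by omega)]
    exact goA_eq_pvG h_ (n.toNat + 1) n.toNat (by omega)
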